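-- pv_equiv track=rewrite | github.com/yuujjjj/AIOSS_GovOn | src/inference/api_server.py | _escape_special_tokens
-- ===== SOURCE A (Python) =====
-- def _escape_special_tokens(text: str) -> str:
--     tokens = [
--         "[|user|]",
--         "[|assistant|]",
--         "[|system|]",
--         "[|endofturn|]",
--         "<thought>",
--         "</thought>",
--     ]
--     for token in tokens:
--         text = text.replace(
--             token,
--             token.replace("[", "\\[")
--             .replace("]", "\\]")
--             .replace("<", "\\<")
--             .replace(">", "\\>"),
--         )
--     return text
-- ===== SOURCE B (Python) =====
-- import re
--
-- _TOKENS = [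
--     "[|user|]",
--     "[|assistant|]",
--     "[|system|]",
--     "[|endofturn|]",
--     "<thought>",
--     "</thought>",
-- ]
-- _ESCAPED = {t: "".join("\\" + ch if ch in "[]<>" else ch for ch in t) for t in _TOKENS}
-- _PATTERN = re.compile("|".join(re.escape(t) for t in _TOKENS))
--
--
-- def _escape_special_tokens(text: str) -> str:
--     return _PATTERN.sub(lambda m: _ESCAPED[m.group(0)], text)
-- ===== Notes on version B (the rewrite author's own statement) =====
-- stated objective: idiomatic
-- what changed: Replaces six sequential full-text str.replace passes with one precompiled regex alternation over the tokens, substituting each match from a precomputed token-to-escaped-form dict in a single left-to-right scan.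
import Mathlib
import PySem

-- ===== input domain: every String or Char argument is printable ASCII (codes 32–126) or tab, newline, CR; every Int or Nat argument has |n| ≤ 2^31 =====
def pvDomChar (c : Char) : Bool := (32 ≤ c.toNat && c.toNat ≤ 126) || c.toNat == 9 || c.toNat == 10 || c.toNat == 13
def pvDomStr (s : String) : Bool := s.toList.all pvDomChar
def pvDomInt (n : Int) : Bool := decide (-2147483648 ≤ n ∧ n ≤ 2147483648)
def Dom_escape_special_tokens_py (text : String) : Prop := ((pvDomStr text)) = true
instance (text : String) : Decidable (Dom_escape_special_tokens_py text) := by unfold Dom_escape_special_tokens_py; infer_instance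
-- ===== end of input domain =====

-- B replaces A's six sequential full-text replace passes by one left-to-right scan
-- (regex alternation + lookup table); equality of the returned strings is proved below. (objective: idiomatic)


-- ===== PORT A =====
-- Python str.replace is PySem.Chars.replace on the code points (PySem.Str.replace is its
-- thin wrapper); the ports work on List Char throughout and repack with String.ofList.
-- token.replace("[","\\[").replace("]","\\]").replace("<","\\<").replace(">","\\>")
def escTokenA (token : List Char) : List Char :=
  PySem.Chars.replace (PySem.Chars.replace (PySem.Chars.replace (PySem.Chars.replace
    token ['['] ['\\','[']) [']'] ['\\',']']) ['<'] ['\\','<']) ['>'] ['\\','>']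

-- tokens = [...]
def tokensA : List (List Char) :=
  [['[','|','u','s','e','r','|',']'],
   ['[','|','a','s','s','i','s','t','a','n','t','|',']'],
   ['[','|','s','y','s','t','e','m','|',']'],
   ['[','|','e','n','d','o','f','t','u','r','n','|',']'],
   ['<','t','h','o','u','g','h','t','>'],
   ['<','/','t','h','o','u','g','h','t','>']]

def escape_special_tokens_py (text : String) : String :=
  String.ofList (List.foldl (fun t token => PySem.Chars.replace t token (escTokenA token)) text.toList tokensA)

-- ===== PORT B =====
-- Source B: the six raw tokens, their pre-escaped forms, and one combined single-pass scan
-- (the compiled regex alternation of the literal tokens, with a lookup replacement).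
def tokensB : List (List Char) :=
  [['[','|','u','s','e','r','|',']'],
   ['[','|','a','s','s','i','s','t','a','n','t','|',']'],
   ['[','|','s','y','s','t','e','m','|',']'],
   ['[','|','e','n','d','o','f','t','u','r','n','|',']'],
   ['<','t','h','o','u','g','h','t','>'],
   ['<','/','t','h','o','u','g','h','t','>']]

-- "".join("\\" + ch if ch in "[]<>" else ch for ch in t)
def escB (t : List Char) : List Char :=
  t.flatMap fun ch => if ch ∈ ['[', ']', '<', '>'] then ['\\', ch] else [ch]

-- _PATTERN.sub: left-to-right scan; at each position the first alternative that matches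
-- is replaced by its table entry and the scan resumes after the match.
def scanB : List Char → List Char
  | [] => []
  | c :: t =>
    match tokensB.find? (fun tok => tok.isPrefixOf (c :: t)) with
    | some tok => escB tok ++ scanB (List.drop (tok.length - 1) t)
    | none => c :: scanB t
termination_by l => l.length
decreasing_by
  · have hd : (List.drop (tok.length - 1) t).length ≤ t.length := by
      rw [List.length_drop]; omega
    simp only [List.length_cons]; omega
  · simp only [List.length_cons]; omega

def escape_special_tokens_py_alt (text : String) : String :=
  String.ofList (scanB text.toList)

-- ===== PRECONDITION & SPEC =====
def Spec_escape_special_tokens_py (text : String) (out : String) : Prop := out = escape_special_tokens_py_alt text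
instance (text : String) (out : String) : Decidable (Spec_escape_special_tokens_py text out) := by unfold Spec_escape_special_tokens_py; infer_instance

-- ===== CLAIM (what is proved, stated in full; the proofs are below) =====
def Claim_equal_escape_special_tokens_py : Prop := ∀ (text : String), Dom_escape_special_tokens_py text → Spec_escape_special_tokens_py text (escape_special_tokens_py text)

-- ===== LEMMAS AND PROOFS =====

-- A clean structural form of PySem.Chars.replace (for nonempty `old`).
def myRepl (old new : List Char) : List Char → List Char
  | [] => []
  | c :: t =>
    if old.isPrefixOf (c :: t) then new ++ myRepl old new (List.drop (old.length - 1) t)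
    else c :: myRepl old new t
termination_by l => l.length
decreasing_by
  · have hd : (List.drop (old.length - 1) t).length ≤ t.length := by
      rw [List.length_drop]; omega
    simp only [List.length_cons]; omega
  · simp only [List.length_cons]; omega

theorem myRepl_nil (old new : List Char) : myRepl old new [] = [] := by
  rw [myRepl.eq_def]

theorem myRepl_cons (old new : List Char) (c : Char) (t : List Char) :
    myRepl old new (c :: t) =
      if old.isPrefixOf (c :: t) then new ++ myRepl old new (List.drop (old.length - 1) t)
      else c :: myRepl old new t := by
  rw [myRepl.eq_def]

theorem scanB_nil : scanB [] = [] := by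
  rw [scanB.eq_def]

theorem scanB_cons_none (c : Char) (t : List Char)
    (h : tokensB.find? (fun tok => tok.isPrefixOf (c :: t)) = none) :
    scanB (c :: t) = c :: scanB t := by
  rw [scanB.eq_def]
  simp only [h]

theorem scanB_cons_some (c : Char) (t : List Char) (tok : List Char)
    (h : tokensB.find? (fun tk => tk.isPrefixOf (c :: t)) = some tok) :
    scanB (c :: t) = escB tok ++ scanB (List.drop (tok.length - 1) t) := by
  rw [scanB.eq_def]
  simp only [h]

theorem go_acc (old new : List Char) (fuel : Nat) (l acc : List Char) :
    PySem.Chars.replace.go old new fuel l acc = acc.reverse ++ PySem.Chars.replace.go old new fuel l [] := by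
  induction fuel generalizing l acc with
  | zero => simp [PySem.Chars.replace.go]
  | succ n ih =>
    cases l with
    | nil => simp [PySem.Chars.replace.go]
    | cons c t =>
      simp only [PySem.Chars.replace.go]
      split
      · rw [ih _ (new.reverse ++ acc), ih _ (new.reverse ++ [])]
        simp
      · rw [ih _ (c :: acc), ih _ [c]]
        simp

theorem go_eq_myRepl (old new : List Char) (hold : old ≠ []) (fuel : Nat) (l : List Char)
    (hf : l.length ≤ fuel) : PySem.Chars.replace.go old new fuel l [] = myRepl old new l := by
  induction fuel generalizing l with
  | zero =>
    have : l = [] := List.eq_nil_of_length_eq_zero (Nat.le_zero.mp hf)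
    subst this
    rw [myRepl_nil]
    simp [PySem.Chars.replace.go]
  | succ n ih =>
    cases l with
    | nil =>
      rw [myRepl_nil]
      simp [PySem.Chars.replace.go]
    | cons c t =>
      have hlen : 1 ≤ old.length := by
        cases old with
        | nil => exact absurd rfl hold
        | cons _ _ => simp
      rw [myRepl_cons]
      simp only [PySem.Chars.replace.go]
      by_cases hp : old.isPrefixOf (c :: t) = true
      · simp only [hp, if_true]
        rw [go_acc]
        simp only [List.reverse_reverse, List.append_nil]
        have hdrop : List.drop old.length (c :: t) = List.drop (old.length - 1) t := by
          cases old with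
          | nil => exact absurd rfl hold
          | cons o os => simp
        rw [hdrop, ih]
        rw [List.length_drop]
        simp only [List.length_cons] at hf
        omega
      · simp only [Bool.not_eq_true] at hp
        simp only [hp, if_false, Bool.false_eq_true]
        rw [go_acc]
        simp only [List.reverse_cons, List.reverse_nil, List.nil_append, List.singleton_append]
        rw [ih]
        simp only [List.length_cons] at hf
        omega

theorem replace_eq_myRepl (s old new : List Char) (hold : old ≠ []) :
    PySem.Chars.replace s old new = myRepl old new s := by
  unfold PySem.Chars.replace
  rw [if_neg (by simpa [List.isEmpty_iff] using hold)]
  exact go_eq_myRepl old new hold s.length s (le_refl _)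

-- If a nonempty backslash-free `p` is a prefix of `myRepl old new l` and `new` starts with
-- a backslash, then `p` was already a prefix of `l` (a replacement cannot create a match head).
theorem prefix_of_myRepl_aux (old new : List Char) (hnew : new.head? = some '\\') :
    ∀ (n : Nat) (l : List Char), l.length ≤ n → ∀ p, p ≠ [] → ('\\' ∉ p) →
      p <+: myRepl old new l → p <+: l := by
  intro n
  induction n with
  | zero =>
    intro l hl p hne _ hpre
    have : l = [] := List.eq_nil_of_length_eq_zero (Nat.le_zero.mp hl)
    subst this
    rw [myRepl_nil] at hpre
    exact absurd (List.prefix_nil.mp hpre) hne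
  | succ n ih =>
    intro l hl p hne hbs hpre
    cases l with
    | nil =>
      rw [myRepl_nil] at hpre
      exact absurd (List.prefix_nil.mp hpre) hne
    | cons c t =>
      rw [myRepl_cons] at hpre
      split at hpre
      · exfalso
        cases p with
        | nil => exact absurd rfl hne
        | cons a q =>
          obtain ⟨z, hz⟩ := hpre
          cases new with
          | nil => simp at hnew
          | cons b r =>
            have hb : b = '\\' := by simpa using hnew
            have ha : a = b := by
              have := congrArg List.head? hz
              simpa using this
            exact hbs (by simp [ha, hb])
      · cases p with
        | nil => exact absurd rfl hne
        | cons a q =>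
          rw [List.cons_prefix_cons] at hpre ⊢
          obtain ⟨hac, hq⟩ := hpre
          refine ⟨hac, ?_⟩
          cases q with
          | nil => exact List.nil_prefix
          | cons b r =>
            exact ih t (by simp only [List.length_cons] at hl; omega) (b :: r) (by simp)
              (fun hmem => hbs (List.mem_cons_of_mem _ hmem)) hq

theorem prefix_of_myRepl (old new : List Char) (hnew : new.head? = some '\\')
    (l p : List Char) (hne : p ≠ []) (hbs : '\\' ∉ p)
    (hpre : p <+: myRepl old new l) : p <+: l :=
  prefix_of_myRepl_aux old new hnew l.length l (le_refl _) p hne hbs hpre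

-- `canSkip tok seg = true`: at every start position inside `seg`, matching `tok` fails at an
-- index still inside `seg` — so no occurrence of `tok` starts inside `seg`, whatever follows.
def canSkip (tok seg : List Char) : Bool :=
  (List.range seg.length).all fun p =>
    (List.range tok.length).any fun m => decide (p + m < seg.length) && decide (tok[m]? ≠ seg[p + m]?)

theorem not_prefix_of_canSkip (tok seg : List Char) (h : canSkip tok seg = true)
    (X : List Char) (p : Nat) (hp : p < seg.length) : ¬ tok <+: (List.drop p seg ++ X) := by
  intro hpre
  simp only [canSkip, List.all_eq_true, List.mem_range, List.any_eq_true, Bool.and_eq_true,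
    decide_eq_true_eq] at h
  obtain ⟨m, hm, hlt, hne⟩ := h p hp
  apply hne
  obtain ⟨z, hz⟩ := hpre
  calc tok[m]? = (tok ++ z)[m]? := (List.getElem?_append_left hm).symm
    _ = (List.drop p seg ++ X)[m]? := by rw [hz]
    _ = (List.drop p seg)[m]? := List.getElem?_append_left (by rw [List.length_drop]; omega)
    _ = seg[p + m]? := by rw [List.getElem?_drop]

theorem canSkip_tail (tok : List Char) (d : Char) (s : List Char)
    (h : canSkip tok (d :: s) = true) : canSkip tok s = true := by
  simp only [canSkip, List.all_eq_true, List.mem_range, List.any_eq_true, Bool.and_eq_true,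
    decide_eq_true_eq] at h ⊢
  intro p hp
  obtain ⟨m, hm, hlt, hne⟩ := h (p + 1) (by simp only [List.length_cons]; omega)
  refine ⟨m, hm, by simp only [List.length_cons] at hlt; omega, ?_⟩
  have he : (d :: s)[p + 1 + m]? = s[p + m]? := by
    have hidx : p + 1 + m = (p + m) + 1 := by omega
    rw [hidx, List.getElem?_cons_succ]
  rwa [he] at hne

theorem myRepl_skip (tok new seg : List Char) (h : canSkip tok seg = true) (X : List Char) :
    myRepl tok new (seg ++ X) = seg ++ myRepl tok new X := by
  induction seg with
  | nil => simp
  | cons d s ihs =>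
    have hnp : ¬ tok <+: (d :: (s ++ X)) := by
      have := not_prefix_of_canSkip tok (d :: s) h X 0 (by simp)
      simpa using this
    rw [List.cons_append, myRepl_cons,
      if_neg (by simpa [List.isPrefixOf_iff_prefix] using hnp), ihs (canSkip_tail tok d s h)]
    rfl

-- matching at the head: myRepl old new (old ++ X) = new ++ myRepl old new X
theorem myRepl_head (old new X : List Char) (hold : old ≠ []) :
    myRepl old new (old ++ X) = new ++ myRepl old new X := by
  cases old with
  | nil => exact absurd rfl hold
  | cons o os =>
    rw [List.cons_append, myRepl_cons, if_pos]
    · simp only [List.length_cons, Nat.add_sub_cancel]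
      rw [List.drop_left]
    · rw [List.isPrefixOf_iff_prefix]
      exact ⟨X, by simp⟩

-- The six tokens and their escaped forms, positionally.
def pvT (i : Nat) : List Char := tokensB.getD i []
def pvE (i : Nat) : List Char := escB (pvT i)

def foldChain (l : List Char) : List Char :=
  myRepl (pvT 5) (pvE 5)
    (myRepl (pvT 4) (pvE 4)
      (myRepl (pvT 3) (pvE 3)
        (myRepl (pvT 2) (pvE 2)
          (myRepl (pvT 1) (pvE 1)
            (myRepl (pvT 0) (pvE 0) l)))))

theorem escB_head (i : Nat) (hi : i < 6) : (pvE i).head? = some '\\' :=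
  (by decide : ∀ i < 6, (pvE i).head? = some '\\') i hi

theorem token_ne_nil (i : Nat) (hi : i < 6) : pvT i ≠ [] :=
  (by decide : ∀ i < 6, pvT i ≠ []) i hi

theorem token_no_bs (i : Nat) (hi : i < 6) : '\\' ∉ pvT i :=
  (by decide : ∀ i < 6, '\\' ∉ pvT i) i hi

theorem canSkip_tok_esc (i j : Nat) (hi : i < 6) (hj : j < 6) :
    canSkip (pvT i) (pvE j) = true :=
  (by decide : ∀ i < 6, ∀ j < 6, canSkip (pvT i) (pvE j) = true) i hi j hj

theorem canSkip_tok_tok (i j : Nat) (hi : i < 6) (hj : j < 6) (hne : i ≠ j) :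
    canSkip (pvT i) (pvT j) = true :=
  (by decide : ∀ i < 6, ∀ j < 6, i ≠ j → canSkip (pvT i) (pvT j) = true) i hi j hj hne

-- prefix non-creation through one replace pass, in cons form
theorem not_prefix_cons_myRepl (i : Nat) (hi : i < 6) (tok : List Char)
    (htne : tok ≠ []) (htbs : '\\' ∉ tok) (c : Char) (t : List Char)
    (h : ¬ tok <+: c :: t) : ¬ tok <+: c :: myRepl (pvT i) (pvE i) t := by
  intro hpre
  apply h
  cases tok with
  | nil => exact absurd rfl htne
  | cons a q =>
    rw [List.cons_prefix_cons] at hpre ⊢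
    obtain ⟨hac, hq⟩ := hpre
    refine ⟨hac, ?_⟩
    cases q with
    | nil => exact List.nil_prefix
    | cons b r =>
      exact prefix_of_myRepl (pvT i) (pvE i) (escB_head i hi) t (b :: r) (by simp)
        (fun hmem => htbs (List.mem_cons_of_mem _ hmem)) hq

theorem find?_none_no_prefix (l : List Char)
    (h : tokensB.find? (fun tok => tok.isPrefixOf l) = none) :
    ∀ i < 6, ¬ (pvT i) <+: l := by
  intro i hi hpre
  have hall : ∀ tok ∈ tokensB, ¬ tok.isPrefixOf l = true := by
    simpa [List.find?_eq_none] using h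
  have hmem : pvT i ∈ tokensB := (by decide : ∀ i < 6, pvT i ∈ tokensB) i hi
  exact hall (pvT i) hmem (by rwa [List.isPrefixOf_iff_prefix])

theorem find?_some_mem (l tok : List Char)
    (h : tokensB.find? (fun t => t.isPrefixOf l) = some tok) :
    ∃ k < 6, tok = pvT k ∧ (pvT k) <+: l := by
  have hmem := List.mem_of_find?_eq_some h
  have hpre : tok <+: l := by
    have := List.find?_some h
    rwa [List.isPrefixOf_iff_prefix] at this
  simp only [tokensB, List.mem_cons, List.not_mem_nil, or_false] at hmem
  rcases hmem with h0 | h1 | h2 | h3 | h4 | h5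
  · exact ⟨0, by omega, by rw [h0]; rfl, by rw [show pvT 0 = tok by rw [h0]; rfl]; exact hpre⟩
  · exact ⟨1, by omega, by rw [h1]; rfl, by rw [show pvT 1 = tok by rw [h1]; rfl]; exact hpre⟩
  · exact ⟨2, by omega, by rw [h2]; rfl, by rw [show pvT 2 = tok by rw [h2]; rfl]; exact hpre⟩
  · exact ⟨3, by omega, by rw [h3]; rfl, by rw [show pvT 3 = tok by rw [h3]; rfl]; exact hpre⟩
  · exact ⟨4, by omega, by rw [h4]; rfl, by rw [show pvT 4 = tok by rw [h4]; rfl]; exact hpre⟩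
  · exact ⟨5, by omega, by rw [h5]; rfl, by rw [show pvT 5 = tok by rw [h5]; rfl]; exact hpre⟩

-- one step of the chain in the "no match" case
theorem chain_cons_none (c : Char) (t : List Char)
    (h : ∀ i < 6, ¬ (pvT i) <+: c :: t) :
    foldChain (c :: t) = c :: foldChain t := by
  simp only [foldChain]
  have step : ∀ (i : Nat), i < 6 → ∀ (X : List Char),
      (∀ j, j < 6 → ¬ (pvT j) <+: c :: X) →
      myRepl (pvT i) (pvE i) (c :: X) = c :: myRepl (pvT i) (pvE i) X := by
    intro i hi X hX
    rw [myRepl_cons, if_neg]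
    rw [List.isPrefixOf_iff_prefix]
    exact hX i hi
  have pres : ∀ (i : Nat), i < 6 → ∀ (X : List Char),
      (∀ j, j < 6 → ¬ (pvT j) <+: c :: X) →
      (∀ j, j < 6 → ¬ (pvT j) <+: c :: myRepl (pvT i) (pvE i) X) := by
    intro i hi X hX j hj
    exact not_prefix_cons_myRepl i hi (pvT j) (token_ne_nil j hj) (token_no_bs j hj) c X (hX j hj)
  have h' : ∀ j, j < 6 → ¬ (pvT j) <+: c :: t := fun j hj => h j hj
  have p0 := pres 0 (by omega) t h'
  have p1 := pres 1 (by omega) _ p0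
  have p2 := pres 2 (by omega) _ p1
  have p3 := pres 3 (by omega) _ p2
  have p4 := pres 4 (by omega) _ p3
  rw [step 0 (by omega) t h', step 1 (by omega) _ p0, step 2 (by omega) _ p1,
    step 3 (by omega) _ p2, step 4 (by omega) _ p3, step 5 (by omega) _ p4]

-- one step of the chain in the "match at token k" case
theorem chain_cons_some (k : Nat) (hk : k < 6) (rest : List Char) :
    foldChain (pvT k ++ rest) = pvE k ++ foldChain rest := by
  simp only [foldChain]
  interval_cases k
  · rw [myRepl_head _ _ _ (token_ne_nil 0 (by omega)),
      myRepl_skip _ _ _ (canSkip_tok_esc 1 0 (by omega) (by omega)),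
      myRepl_skip _ _ _ (canSkip_tok_esc 2 0 (by omega) (by omega)),
      myRepl_skip _ _ _ (canSkip_tok_esc 3 0 (by omega) (by omega)),
      myRepl_skip _ _ _ (canSkip_tok_esc 4 0 (by omega) (by omega)),
      myRepl_skip _ _ _ (canSkip_tok_esc 5 0 (by omega) (by omega))]
  · rw [myRepl_skip _ _ _ (canSkip_tok_tok 0 1 (by omega) (by omega) (by omega)),
      myRepl_head _ _ _ (token_ne_nil 1 (by omega)),
      myRepl_skip _ _ _ (canSkip_tok_esc 2 1 (by omega) (by omega)),
      myRepl_skip _ _ _ (canSkip_tok_esc 3 1 (by omega) (by omega)),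
      myRepl_skip _ _ _ (canSkip_tok_esc 4 1 (by omega) (by omega)),
      myRepl_skip _ _ _ (canSkip_tok_esc 5 1 (by omega) (by omega))]
  · rw [myRepl_skip _ _ _ (canSkip_tok_tok 0 2 (by omega) (by omega) (by omega)),
      myRepl_skip _ _ _ (canSkip_tok_tok 1 2 (by omega) (by omega) (by omega)),
      myRepl_head _ _ _ (token_ne_nil 2 (by omega)),
      myRepl_skip _ _ _ (canSkip_tok_esc 3 2 (by omega) (by omega)),
      myRepl_skip _ _ _ (canSkip_tok_esc 4 2 (by omega) (by omega)),
      myRepl_skip _ _ _ (canSkip_tok_esc 5 2 (by omega) (by omega))]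
  · rw [myRepl_skip _ _ _ (canSkip_tok_tok 0 3 (by omega) (by omega) (by omega)),
      myRepl_skip _ _ _ (canSkip_tok_tok 1 3 (by omega) (by omega) (by omega)),
      myRepl_skip _ _ _ (canSkip_tok_tok 2 3 (by omega) (by omega) (by omega)),
      myRepl_head _ _ _ (token_ne_nil 3 (by omega)),
      myRepl_skip _ _ _ (canSkip_tok_esc 4 3 (by omega) (by omega)),
      myRepl_skip _ _ _ (canSkip_tok_esc 5 3 (by omega) (by omega))]
  · rw [myRepl_skip _ _ _ (canSkip_tok_tok 0 4 (by omega) (by omega) (by omega)),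
      myRepl_skip _ _ _ (canSkip_tok_tok 1 4 (by omega) (by omega) (by omega)),
      myRepl_skip _ _ _ (canSkip_tok_tok 2 4 (by omega) (by omega) (by omega)),
      myRepl_skip _ _ _ (canSkip_tok_tok 3 4 (by omega) (by omega) (by omega)),
      myRepl_head _ _ _ (token_ne_nil 4 (by omega)),
      myRepl_skip _ _ _ (canSkip_tok_esc 5 4 (by omega) (by omega))]
  · rw [myRepl_skip _ _ _ (canSkip_tok_tok 0 5 (by omega) (by omega) (by omega)),
      myRepl_skip _ _ _ (canSkip_tok_tok 1 5 (by omega) (by omega) (by omega)),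
      myRepl_skip _ _ _ (canSkip_tok_tok 2 5 (by omega) (by omega) (by omega)),
      myRepl_skip _ _ _ (canSkip_tok_tok 3 5 (by omega) (by omega) (by omega)),
      myRepl_skip _ _ _ (canSkip_tok_tok 4 5 (by omega) (by omega) (by omega)),
      myRepl_head _ _ _ (token_ne_nil 5 (by omega))]

-- main: the six-pass chain equals the single scan
theorem chain_eq_scanB (l : List Char) : foldChain l = scanB l := by
  have H : ∀ (n : Nat) (l : List Char), l.length ≤ n → foldChain l = scanB l := by
    intro n
    induction n with
    | zero =>
      intro l hl
      have : l = [] := List.eq_nil_of_length_eq_zero (Nat.le_zero.mp hl)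
      subst this
      simp only [foldChain]
      rw [myRepl_nil, myRepl_nil, myRepl_nil, myRepl_nil, myRepl_nil, myRepl_nil, scanB_nil]
    | succ n ih =>
      intro l hl
      cases l with
      | nil =>
        simp only [foldChain]
        rw [myRepl_nil, myRepl_nil, myRepl_nil, myRepl_nil, myRepl_nil, myRepl_nil, scanB_nil]
      | cons c t =>
        cases hfind : tokensB.find? (fun tok => tok.isPrefixOf (c :: t)) with
        | none =>
          rw [scanB_cons_none c t hfind, chain_cons_none c t (find?_none_no_prefix _ hfind)]
          rw [ih t (by simp only [List.length_cons] at hl; omega)]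
        | some tok =>
          obtain ⟨k, hk, htok, hpre⟩ := find?_some_mem _ _ hfind
          subst htok
          obtain ⟨rest, hrest⟩ := hpre
          rw [scanB_cons_some c t _ hfind]
          have hTne := token_ne_nil k hk
          have hdropeq : List.drop ((pvT k).length - 1) t = rest := by
            cases hT : pvT k with
            | nil => exact absurd hT hTne
            | cons o os =>
              rw [hT] at hrest
              rw [List.cons_append] at hrest
              have ht : os ++ rest = t := (List.cons.injEq _ _ _ _).mp hrest |>.2
              rw [List.length_cons, Nat.add_sub_cancel, ← ht, List.drop_left]
          rw [hdropeq, show (c :: t) = pvT k ++ rest from hrest.symm, chain_cons_some k hk rest]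
          have hrl : rest.length ≤ n := by
            have hlen := congrArg List.length hrest
            simp only [List.length_append, List.length_cons] at hlen
            have hTpos : 0 < (pvT k).length := by
              cases hT : pvT k with
              | nil => exact absurd hT hTne
              | cons _ _ => simp
            simp only [List.length_cons] at hl
            omega
          rw [ih rest hrl]
          rfl
  exact H l.length l (le_refl _)

-- bridge: port A computes the chain
theorem portA_eq_chain (text : String) :
    (escape_special_tokens_py text).toList = foldChain text.toList := by
  simp only [escape_special_tokens_py, tokensA, List.foldl, String.toList_ofList]
  rw [replace_eq_myRepl _ _ _ (by decide), replace_eq_myRepl _ _ _ (by decide),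
    replace_eq_myRepl _ _ _ (by decide), replace_eq_myRepl _ _ _ (by decide),
    replace_eq_myRepl _ _ _ (by decide), replace_eq_myRepl _ _ _ (by decide)]
  rw [show (['[','|','u','s','e','r','|',']'] : List Char) = pvT 0 from by decide,
    show (['[','|','a','s','s','i','s','t','a','n','t','|',']'] : List Char) = pvT 1 from by decide,
    show (['[','|','s','y','s','t','e','m','|',']'] : List Char) = pvT 2 from by decide,
    show (['[','|','e','n','d','o','f','t','u','r','n','|',']'] : List Char) = pvT 3 from by decide,
    show (['<','t','h','o','u','g','h','t','>'] : List Char) = pvT 4 from by decide,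
    show (['<','/','t','h','o','u','g','h','t','>'] : List Char) = pvT 5 from by decide]
  rw [show escTokenA (pvT 0) = pvE 0 from by decide,
    show escTokenA (pvT 1) = pvE 1 from by decide,
    show escTokenA (pvT 2) = pvE 2 from by decide,
    show escTokenA (pvT 3) = pvE 3 from by decide,
    show escTokenA (pvT 4) = pvE 4 from by decide,
    show escTokenA (pvT 5) = pvE 5 from by decide]
  rfl

-- ===== VERDICT (by name: the statement is the Claim_ definition above) =====
theorem escape_special_tokens_py_spec : Claim_equal_escape_special_tokens_py := by
  intro text _
  unfold Spec_escape_special_tokens_py escape_special_tokens_py_alt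
  have h := portA_eq_chain text
  rw [chain_eq_scanB] at h
  rw [← h]
  exact String.ofList_toList.symm
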